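-- pv_equiv track=rewrite | github.com/Pranavi2002/CodePath-TP-102-Course | Unit-3/session-1/s1v2p7.py | make_smallest_watchlist
-- ===== SOURCE A (Python) =====
-- def make_smallest_watchlist(watchlist):
--     shows = list(watchlist)
--     left = 0
--     right = len(shows) - 1
--     while left < right:
--         if shows[left] != shows[right]:
--             c = shows[left] if shows[left] < shows[right] else shows[right]
--             shows[left] = shows[right] = c
--         left += 1
--         right -= 1
--     return ''.join(shows)
-- ===== SOURCE B (Python) =====
-- def make_smallest_watchlist(watchlist):
--     shows = list(watchlist)
--     n = len(shows)
--     return ''.join(min(shows[i], shows[n - 1 - i]) for i in range(n))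
-- ===== Notes on version B (the rewrite author's own statement) =====
-- stated objective: simpler
-- what changed: Replaces the half-pass two-pointer loop that mutates both ends of the list in place with a single mutation-free full pass computing each output character independently as min of position i and its mirror n-1-i.
import Mathlib
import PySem

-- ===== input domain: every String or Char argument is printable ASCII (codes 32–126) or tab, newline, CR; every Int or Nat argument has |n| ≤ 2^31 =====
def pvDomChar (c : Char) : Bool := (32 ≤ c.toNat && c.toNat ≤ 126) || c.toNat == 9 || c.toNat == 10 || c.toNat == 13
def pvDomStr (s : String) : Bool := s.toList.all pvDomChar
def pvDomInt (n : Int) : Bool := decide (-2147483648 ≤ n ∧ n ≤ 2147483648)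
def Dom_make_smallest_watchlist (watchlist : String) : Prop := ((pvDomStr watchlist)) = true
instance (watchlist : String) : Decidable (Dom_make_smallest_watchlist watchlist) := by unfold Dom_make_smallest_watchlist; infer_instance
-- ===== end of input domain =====

-- B replaces A's half-pass two-pointer in-place mutation with a mutation-free full pass,
-- each output char computed independently as min of position i and its mirror n-1-i (simpler).


-- ===== PORT A =====
-- the while loop; left/right are Ints as in Python (right = len-1 is -1 on "").
-- Whenever the body runs, 0 ≤ left < right < length, so the .toNat indexing is exact.
-- `fuel` is only a structural-recursion totality guard: each iteration narrows right-left by 2,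
-- so any fuel ≥ right-left suffices and the caller's fuel = length never runs out.
def pvLoopA (fuel : Nat) (s : List Char) (left right : Int) : List Char :=
  match fuel with
  | 0 => s
  | fuel + 1 =>
    if left < right then
      let a := s.getD left.toNat ' '
      let b := s.getD right.toNat ' '
      if a ≠ b then
        let c := if a < b then a else b
        pvLoopA fuel ((s.set left.toNat c).set right.toNat c) (left + 1) (right - 1)
      else
        pvLoopA fuel s (left + 1) (right - 1)
    else s

def make_smallest_watchlist (watchlist : String) : String :=
  let shows := watchlist.toList
  String.mk (pvLoopA shows.length shows 0 ((shows.length : Int) - 1))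

-- ===== PORT B =====
def make_smallest_watchlist_alt (watchlist : String) : String :=
  let shows := watchlist.toList
  let n := shows.length
  String.mk ((List.range n).map fun i => min (shows.getD i ' ') (shows.getD (n - 1 - i) ' '))

-- ===== PRECONDITION & SPEC =====
def Spec_make_smallest_watchlist (watchlist : String) (out : String) : Prop := out = make_smallest_watchlist_alt watchlist
instance (watchlist : String) (out : String) : Decidable (Spec_make_smallest_watchlist watchlist out) := by unfold Spec_make_smallest_watchlist; infer_instance

-- ===== CLAIM (what is proved, stated in full; the proofs are below) =====
def Claim_equal_make_smallest_watchlist : Prop := ∀ (watchlist : String), Dom_make_smallest_watchlist watchlist → Spec_make_smallest_watchlist watchlist (make_smallest_watchlist watchlist)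

-- ===== LEMMAS AND PROOFS =====

theorem pvLoopA_length (fuel : Nat) (s : List Char) (left right : Int) :
    (pvLoopA fuel s left right).length = s.length := by
  fun_induction pvLoopA fuel s left right <;> simp_all

theorem getD_set_eq_ite (s : List Char) (n m : Nat) (a d : Char) :
    (s.set n a).getD m d = if n = m ∧ n < s.length then a else s.getD m d := by
  simp [List.getD_eq_getElem?_getD, List.getElem?_set]
  split_ifs with h1 h2 h3 <;> simp_all <;> omega

theorem pvLoopA_getD (fuel : Nat) (s : List Char) (left right : Int) (h0 : 0 ≤ left)
    (h1 : right < (s.length : Int)) (hf : right - left ≤ (fuel : Int)) (i : Nat) :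
    (pvLoopA fuel s left right).getD i ' ' =
      if left ≤ (i : Int) ∧ (i : Int) ≤ right then
        min (s.getD i ' ') (s.getD (left + right - i).toNat ' ')
      else s.getD i ' ' := by
  fun_induction pvLoopA fuel s left right with
  | case1 s left right =>
    by_cases hc : left ≤ (i : Int) ∧ (i : Int) ≤ right
    · rw [if_pos hc]
      have hmir : (left + right - (i : Int)).toNat = i := by omega
      rw [hmir, min_self]
    · rw [if_neg hc]
  | case2 s left right fuel hlr a b hne c ih =>
    have hlt : left.toNat < s.length := by omega
    have hrt : right.toNat < s.length := by omega
    have hne' : left.toNat ≠ right.toNat := by omega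
    have hcmin : c = min a b := by
      show (if a < b then a else b) = min a b
      rw [min_def]
      rcases lt_trichotomy a b with h | h | h
      · rw [if_pos h, if_pos (le_of_lt h)]
      · exact absurd h hne
      · rw [if_neg (not_lt_of_gt h), if_neg (not_le_of_gt h)]
    have e_lt : ((s.set left.toNat c).set right.toNat c).getD left.toNat ' ' = c := by
      rw [getD_set_eq_ite, if_neg (by simp; omega), getD_set_eq_ite,
        if_pos ⟨rfl, hlt⟩]
    have e_rt : ((s.set left.toNat c).set right.toNat c).getD right.toNat ' ' = c := by
      rw [getD_set_eq_ite, if_pos ⟨rfl, by simp [hrt]⟩]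
    rw [ih (by omega) (by simp; omega) (by omega)]
    by_cases hil : (i : Int) = left
    · have hi : i = left.toNat := by omega
      subst hi
      rw [if_neg (by omega), if_pos (by constructor <;> omega)]
      have hmir : (left + right - (left.toNat : Int)).toNat = right.toNat := by omega
      rw [hmir, e_lt, hcmin]
    · by_cases hir : (i : Int) = right
      · have hi : i = right.toNat := by omega
        subst hi
        rw [if_neg (by omega), if_pos (by constructor <;> omega)]
        have hmir : (left + right - (right.toNat : Int)).toNat = left.toNat := by omega
        rw [hmir, e_rt, hcmin, min_comm]
      · by_cases hin : left + 1 ≤ (i : Int) ∧ (i : Int) ≤ right - 1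
        · rw [if_pos hin, if_pos (by omega)]
          have harith : left + 1 + (right - 1) - i = left + right - i := by ring
          rw [harith]
          have e1 : ((s.set left.toNat c).set right.toNat c).getD i ' ' = s.getD i ' ' := by
            rw [getD_set_eq_ite, if_neg (by simp; omega),
              getD_set_eq_ite, if_neg (by simp; omega)]
          have e2 : ((s.set left.toNat c).set right.toNat c).getD (left + right - i).toNat ' '
              = s.getD (left + right - i).toNat ' ' := by
            rw [getD_set_eq_ite, if_neg (by simp; omega),
              getD_set_eq_ite, if_neg (by simp; omega)]
          rw [e1, e2]
        · rw [if_neg hin, if_neg (by omega)]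
          rw [getD_set_eq_ite, if_neg (by simp; omega),
            getD_set_eq_ite, if_neg (by simp; omega)]
  | case3 s left right fuel hlr a b hne ih =>
    rw [ih (by omega) (by omega) (by omega)]
    have hab : s.getD left.toNat ' ' = s.getD right.toNat ' ' := by simpa using hne
    by_cases hil : (i : Int) = left
    · have hi : i = left.toNat := by omega
      subst hi
      rw [if_neg (by omega), if_pos (by constructor <;> omega)]
      have hmir : (left + right - (left.toNat : Int)).toNat = right.toNat := by omega
      rw [hmir, ← hab, min_self]
    · by_cases hir : (i : Int) = right
      · have hi : i = right.toNat := by omega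
        subst hi
        rw [if_neg (by omega), if_pos (by constructor <;> omega)]
        have hmir : (left + right - (right.toNat : Int)).toNat = left.toNat := by omega
        rw [hmir, hab, min_self]
      · by_cases hin : left + 1 ≤ (i : Int) ∧ (i : Int) ≤ right - 1
        · rw [if_pos hin, if_pos (by omega)]
          have harith : left + 1 + (right - 1) - i = left + right - i := by ring
          rw [harith]
        · rw [if_neg hin, if_neg (by omega)]
  | case4 s left right fuel hlr =>
    by_cases hc : left ≤ (i : Int) ∧ (i : Int) ≤ right
    · rw [if_pos hc]
      have hmir : (left + right - (i : Int)).toNat = i := by omega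
      rw [hmir, min_self]
    · rw [if_neg hc]

-- ===== VERDICT (by name: the statement is the Claim_ definition above) =====
theorem make_smallest_watchlist_spec : Claim_equal_make_smallest_watchlist := by
  intro w _
  show String.mk (pvLoopA w.toList.length w.toList 0 ((w.toList.length : Int) - 1))
      = String.mk ((List.range w.toList.length).map fun i =>
          min (w.toList.getD i ' ') (w.toList.getD (w.toList.length - 1 - i) ' '))
  congr 1
  apply List.ext_getElem
  · simp [pvLoopA_length]
  · intro i h1 h2
    have hi : i < w.toList.length := by simpa [pvLoopA_length] using h1
    have hget := pvLoopA_getD w.toList.length w.toList 0 ((w.toList.length : Int) - 1) (by omega) (by omega) (by omega) i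
    rw [if_pos (by constructor <;> omega)] at hget
    have hmir : (0 + ((w.toList.length : Int) - 1) - i).toNat = w.toList.length - 1 - i := by omega
    rw [hmir] at hget
    calc (pvLoopA w.toList.length w.toList 0 ((w.toList.length : Int) - 1))[i]
        = (pvLoopA w.toList.length w.toList 0 ((w.toList.length : Int) - 1)).getD i ' ' := by
          rw [List.getD_eq_getElem _ _ (by rw [pvLoopA_length]; exact hi)]
      _ = min (w.toList.getD i ' ') (w.toList.getD (w.toList.length - 1 - i) ' ') := hget
      _ = ((List.range w.toList.length).map fun j =>
            min (w.toList.getD j ' ') (w.toList.getD (w.toList.length - 1 - j) ' '))[i] := by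
          simp
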